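-- pv_equiv track=rewrite | github.com/cmdouglas/advent2017 | day11.py | furthest_from_origin
-- ===== SOURCE A (Python) =====
-- DIRS = {
--     'n': (0, 2),
--     'ne': (1, 1),
--     'se': (1, -1),
--     's': (0, -2),
--     'sw': (-1, -1),
--     'nw': (-1, 1)
-- }
--
-- def furthest_from_origin(path):
--     x, y = (0, 0)
--     furthest_distance = 0
--     furthest_point = (0, 0)
--     for direction in path:
--         dx, dy = DIRS[direction]
--         x += dx
--         y += dy
--         distance = abs(x + y)
--         if distance >= furthest_distance:
--             furthest_distance = distance
--             furthest_point = (x, y)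
--
--     return furthest_point
-- ===== SOURCE B (Python) =====
-- DIRS = {
--     'n': (0, 2),
--     'ne': (1, 1),
--     'se': (1, -1),
--     's': (0, -2),
--     'sw': (-1, -1),
--     'nw': (-1, 1)
-- }
--
-- def furthest_from_origin(path):
--     # Pass 1: build the full list of cumulative positions, origin included.
--     points = [(0, 0)]
--     x = y = 0
--     for direction in path:
--         dx, dy = DIRS[direction]
--         x += dx
--         y += dy
--         points.append((x, y))
--     # Pass 2: argmax by (distance, index) — the index tiebreak keeps the LAST
--     # point attaining the maximal distance, and the origin is a candidate.
--     best = max(enumerate(points), key=lambda ip: (abs(ip[1][0] + ip[1][1]), ip[0]))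
--     return best[1]
-- ===== Notes on version B (the rewrite author's own statement) =====
-- stated objective: alternative
-- what changed: Replaces the fused accumulate-and-track-best loop by two separate passes: first build the full list of cumulative positions (origin included), then pick the furthest by an argmax keyed on (distance, index), the index tiebreak reproducing A's '>=' keep-the-last rule.
import Mathlib
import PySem

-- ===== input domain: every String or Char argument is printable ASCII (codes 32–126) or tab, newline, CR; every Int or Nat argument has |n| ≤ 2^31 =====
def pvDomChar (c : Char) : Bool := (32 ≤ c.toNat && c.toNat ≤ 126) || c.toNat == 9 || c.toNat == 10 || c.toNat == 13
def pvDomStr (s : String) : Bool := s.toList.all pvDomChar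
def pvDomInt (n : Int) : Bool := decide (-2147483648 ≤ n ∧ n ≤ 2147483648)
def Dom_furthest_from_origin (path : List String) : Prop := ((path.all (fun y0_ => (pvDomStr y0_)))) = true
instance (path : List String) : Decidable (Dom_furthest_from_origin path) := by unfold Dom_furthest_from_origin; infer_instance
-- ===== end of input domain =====

-- B builds the full list of cumulative positions first, then takes a separate
-- argmax pass keyed by (distance, index); same return value, different decomposition.

-- module-level constant shared by Source A and Source B
def DIRS : PySem.Dict String (Int × Int) :=
  (((((((PySem.Dict.empty).insert "n" (0, 2)).insert "ne" (1, 1)).insert "se" (1, -1)).insert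
      "s" (0, -2)).insert "sw" (-1, -1)).insert "nw" (-1, 1))

-- ===== PORT A =====
-- DIRS[direction]: Python raises KeyError on an unknown direction; Pre_ excludes
-- those inputs, the port uses a (0,0) default there (outside the claim).
def furthest_from_origin (path : List String) : Int × Int :=
  (path.foldl
    (fun (st : Int × Int × Int × (Int × Int)) direction =>
      let (x, y, furthest_distance, furthest_point) := st
      let (dx, dy) := (PySem.Dict.get? DIRS direction).getD (0, 0)
      let x := x + dx
      let y := y + dy
      let distance := |x + y|
      if furthest_distance ≤ distance then (x, y, distance, (x, y))
      else (x, y, furthest_distance, furthest_point))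
    (0, 0, 0, (0, 0))).2.2.2

-- ===== PORT B =====
def furthest_from_origin_alt (path : List String) : Int × Int :=
  let st := path.foldl
    (fun (s : List (Int × Int) × Int × Int) direction =>
      let (points, x, y) := s
      let (dx, dy) := (PySem.Dict.get? DIRS direction).getD (0, 0)
      let x := x + dx
      let y := y + dy
      (points ++ [(x, y)], x, y))
    ([(0, 0)], 0, 0)
  match PySem.List.max2? (PySem.List.enumerate st.1)
      (fun ip => |ip.2.1 + ip.2.2|) (fun ip => ip.1) with
  | some best => best.2
  | none => (0, 0)

-- ===== PRECONDITION & SPEC =====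
-- Pre_ excludes paths containing a direction not in DIRS, on which Python A raises KeyError.
def Pre_furthest_from_origin (path : List String) : Prop :=
  ∀ d ∈ path, d = "n" ∨ d = "ne" ∨ d = "se" ∨ d = "s" ∨ d = "sw" ∨ d = "nw"
instance (path : List String) : Decidable (Pre_furthest_from_origin path) := by
  unfold Pre_furthest_from_origin; infer_instance

def pvWitness_furthest_from_origin : List String := ["ne", "ne", "s", "nw"]

def Spec_furthest_from_origin (path : List String) (out : Int × Int) : Prop := out = furthest_from_origin_alt path
instance (path : List String) (out : Int × Int) : Decidable (Spec_furthest_from_origin path out) := by unfold Spec_furthest_from_origin; infer_instance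

-- ===== CLAIM (what is proved, stated in full; the proofs are below) =====
def Claim_equal_furthest_from_origin : Prop := ∀ (path : List String), Dom_furthest_from_origin path → Pre_furthest_from_origin path → Spec_furthest_from_origin path (furthest_from_origin path)

-- ===== LEMMAS AND PROOFS =====

-- the step of A's fused loop
def stepA (st : Int × Int × Int × (Int × Int)) (direction : String) : Int × Int × Int × (Int × Int) :=
  let (x, y, furthest_distance, furthest_point) := st
  let (dx, dy) := (PySem.Dict.get? DIRS direction).getD (0, 0)
  let x := x + dx
  let y := y + dy
  let distance := |x + y|
  if furthest_distance ≤ distance then (x, y, distance, (x, y))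
  else (x, y, furthest_distance, furthest_point)

-- the step of the argmax fold hidden in PySem.List.max2?
def mstep (acc : Option (Int × (Int × Int))) (ip : Int × (Int × Int)) : Option (Int × (Int × Int)) :=
  match acc with
  | none => some ip
  | some m =>
    if (decide (|m.2.1 + m.2.2| < |ip.2.1 + ip.2.2|) ||
        (!decide (|ip.2.1 + ip.2.2| < |m.2.1 + m.2.2|) && decide (m.1 < ip.1))) = true
    then some ip else some m

-- the list of cumulative positions after the start point (x, y)
def ptsFrom (x y : Int) : List String → List (Int × Int)
  | [] => []
  | d :: rest =>
    let (dx, dy) := (PySem.Dict.get? DIRS d).getD (0, 0)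
    (x + dx, y + dy) :: ptsFrom (x + dx) (y + dy) rest

theorem foldl_eq_stepA (path : List String) (st : Int × Int × Int × (Int × Int)) :
    path.foldl
      (fun (st : Int × Int × Int × (Int × Int)) direction =>
        let (x, y, furthest_distance, furthest_point) := st
        let (dx, dy) := (PySem.Dict.get? DIRS direction).getD (0, 0)
        let x := x + dx
        let y := y + dy
        let distance := |x + y|
        if furthest_distance ≤ distance then (x, y, distance, (x, y))
        else (x, y, furthest_distance, furthest_point)) st
    = path.foldl stepA st := rfl

-- B's first pass builds pts ++ ptsFrom x y path
theorem build_points (path : List String) (pts : List (Int × Int)) (x y : Int) :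
    (path.foldl
      (fun (s : List (Int × Int) × Int × Int) direction =>
        let (points, x, y) := s
        let (dx, dy) := (PySem.Dict.get? DIRS direction).getD (0, 0)
        let x := x + dx
        let y := y + dy
        (points ++ [(x, y)], x, y)) (pts, x, y)).1
    = pts ++ ptsFrom x y path := by
  induction path generalizing pts x y with
  | nil => simp [ptsFrom]
  | cons d rest ih =>
    simp only [List.foldl_cons, ptsFrom]
    rw [ih]
    simp

-- the argmax fold over the remaining enumerated points computes A's running best
theorem main_lemma (path : List String) (x y j i : Int) (fp : Int × Int) (hji : j < i) :
    (List.foldl mstep (some (j, fp)) (PySem.List.enumerate (ptsFrom x y path) i)).map Prod.snd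
    = some ((path.foldl stepA (x, y, |fp.1 + fp.2|, fp)).2.2.2) := by
  induction path generalizing x y j i fp with
  | nil => simp [ptsFrom]
  | cons d rest ih =>
    rcases hd : (PySem.Dict.get? DIRS d).getD (0, 0) with ⟨dx, dy⟩
    simp only [ptsFrom, hd, List.foldl_cons, stepA, PySem.List.enumerate_cons]
    by_cases h : |fp.1 + fp.2| ≤ |x + dx + (y + dy)|
    · have hm : mstep (some (j, fp)) (i, (x + dx, y + dy)) = some (i, (x + dx, y + dy)) := by
        simp only [mstep]
        have hc : (decide (|fp.1 + fp.2| < |(x + dx) + (y + dy)|) ||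
            (!decide (|(x + dx) + (y + dy)| < |fp.1 + fp.2|) && decide (j < i))) = true := by
          simp only [Bool.or_eq_true, Bool.and_eq_true, Bool.not_eq_true', decide_eq_true_iff,
            decide_eq_false_iff_not]
          omega
        simp [hc]
      rw [hm, if_pos h]
      simpa using ih (x + dx) (y + dy) i (i + 1) (x + dx, y + dy) (by omega)
    · have hm : mstep (some (j, fp)) (i, (x + dx, y + dy)) = some (j, fp) := by
        simp only [mstep]
        have hc : (decide (|fp.1 + fp.2| < |(x + dx) + (y + dy)|) ||
            (!decide (|(x + dx) + (y + dy)| < |fp.1 + fp.2|) && decide (j < i))) = false := by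
          simp only [Bool.or_eq_false_iff, Bool.and_eq_false_iff, Bool.not_eq_false',
            decide_eq_true_iff, decide_eq_false_iff_not]
          omega
        simp [hc]
      rw [hm, if_neg h]
      exact ih (x + dx) (y + dy) j (i + 1) fp (by omega)

theorem max2?_eq_foldl_mstep (l : List (Int × (Int × Int))) :
    PySem.List.max2? l (fun ip => |ip.2.1 + ip.2.2|) (fun ip => ip.1) = l.foldl mstep none := by
  unfold PySem.List.max2?
  congr 1
  funext acc x
  cases acc <;> rfl

-- ===== VERDICT (by name: the statement is the Claim_ definition above) =====
theorem furthest_from_origin_spec : Claim_equal_furthest_from_origin := by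
  intro path _ _
  unfold Spec_furthest_from_origin furthest_from_origin furthest_from_origin_alt
  rw [foldl_eq_stepA]
  simp only [build_points, List.singleton_append, max2?_eq_foldl_mstep,
    PySem.List.enumerate_cons, List.foldl_cons]
  have hstart : mstep none (0, (0, 0)) = some (0, (0, 0)) := rfl
  rw [hstart]
  simp only [zero_add]
  have := main_lemma path 0 0 0 1 (0, 0) (by omega)
  simp only [show |(0 : Int) + 0| = 0 from rfl] at this
  rcases ho : List.foldl mstep (some (0, (0, 0)))
      (PySem.List.enumerate (ptsFrom 0 0 path) 1) with _ | ⟨k, best⟩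
  · rw [ho] at this; simp at this
  · rw [ho] at this
    simp only [Option.map_some, Option.some.injEq] at this
    simpa using this.symm
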